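-- pv_equiv track=rewrite | github.com/apettenati/jetbrains-python | Multilingual Online Translator/Multilingual Online Translator/task/translator/translator.py | print_translated_sentences
-- ===== SOURCE A (Python) =====
-- def print_translated_sentences(language_to, translated_sentences):
--     all_translated_sentences = f'{language_to} Examples: \n'
--     tracker = False
--     for sentence in translated_sentences:
--         all_translated_sentences += f'{sentence}\n'
--         if tracker:
--             all_translated_sentences += '\n'
--         tracker = not tracker
--     return all_translated_sentences
-- ===== SOURCE B (Python) =====
-- def print_translated_sentences(language_to, translated_sentences):
--     parts = [f'{language_to} Examples: \n']
--     for i in range(0, len(translated_sentences), 2):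
--         chunk = translated_sentences[i:i + 2]
--         parts.append('\n'.join(chunk) + '\n')
--         if len(chunk) == 2:
--             parts.append('\n')
--     return ''.join(parts)
-- ===== Notes on version B (the rewrite author's own statement) =====
-- stated objective: alternative
-- what changed: B builds the output from consecutive chunks of two sentences (each chunk rendered as '\n'.join(chunk)+'\n' plus a blank line only for full pairs, collected in a parts list joined once), instead of A's single pass appending to a string with a boolean toggle.
import Mathlib
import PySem

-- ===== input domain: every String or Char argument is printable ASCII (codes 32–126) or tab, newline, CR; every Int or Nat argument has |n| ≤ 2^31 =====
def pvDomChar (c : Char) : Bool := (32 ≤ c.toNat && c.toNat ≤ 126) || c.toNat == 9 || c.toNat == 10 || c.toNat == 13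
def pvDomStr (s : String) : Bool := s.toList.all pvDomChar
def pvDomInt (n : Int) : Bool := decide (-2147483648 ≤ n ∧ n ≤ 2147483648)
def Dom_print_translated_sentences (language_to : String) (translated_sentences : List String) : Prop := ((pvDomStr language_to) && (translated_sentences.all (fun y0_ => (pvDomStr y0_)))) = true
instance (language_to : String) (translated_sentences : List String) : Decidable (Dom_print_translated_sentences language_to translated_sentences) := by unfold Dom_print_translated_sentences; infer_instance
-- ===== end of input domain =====

-- ===== PORT A =====
-- A: one pass over the sentences, appending to a string with a boolean toggle that
-- inserts a blank line after every second sentence.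
def pvLoopA (st : String × Bool) (sentence : String) : String × Bool :=
  let s := st.1 ++ sentence ++ "\n"
  (if st.2 then s ++ "\n" else s, !st.2)

def print_translated_sentences (language_to : String) (translated_sentences : List String) : String :=
  (translated_sentences.foldl pvLoopA (language_to ++ " Examples: \n", false)).1

-- ===== PORT B =====
-- B: render consecutive chunks of two sentences; a full pair gets a trailing blank line.
def pvChunks : List String → String
  | [] => ""
  | [x] => x ++ "\n"
  | x :: y :: rest => (x ++ "\n" ++ y) ++ "\n" ++ "\n" ++ pvChunks rest

def print_translated_sentences_alt (language_to : String) (translated_sentences : List String) : String :=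
  (language_to ++ " Examples: \n") ++ pvChunks translated_sentences

-- ===== PRECONDITION & SPEC =====
def Spec_print_translated_sentences (language_to : String) (translated_sentences : List String) (out : String) : Prop := out = print_translated_sentences_alt language_to translated_sentences
instance (language_to : String) (translated_sentences : List String) (out : String) : Decidable (Spec_print_translated_sentences language_to translated_sentences out) := by unfold Spec_print_translated_sentences; infer_instance

-- ===== CLAIM (what is proved, stated in full; the proofs are below) =====
def Claim_equal_print_translated_sentences : Prop := ∀ (language_to : String) (translated_sentences : List String), Dom_print_translated_sentences language_to translated_sentences → Spec_print_translated_sentences language_to translated_sentences (print_translated_sentences language_to translated_sentences)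

-- ===== LEMMAS AND PROOFS =====
theorem pvLoopA_chunks (l : List String) : ∀ acc : String,
    (l.foldl pvLoopA (acc, false)).1 = acc ++ pvChunks l := by
  induction l using pvChunks.induct with
  | case1 => intro acc; simp [pvChunks]
  | case2 x => intro acc; simp [pvChunks, pvLoopA, String.append_assoc]
  | case3 x y rest ih =>
      intro acc
      simp only [List.foldl, pvLoopA, pvChunks, Bool.not_false, if_true, Bool.not_true]
      rw [ih]
      simp [String.append_assoc]

-- ===== VERDICT (by name: the statement is the Claim_ definition above) =====
theorem print_translated_sentences_spec : Claim_equal_print_translated_sentences := by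
  intro language_to translated_sentences _
  unfold Spec_print_translated_sentences print_translated_sentences print_translated_sentences_alt
  exact pvLoopA_chunks translated_sentences _
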